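-- pv_equiv track=rewrite | github.com/roywong35/hackerrank-solutions | Warm-up Challenges/Repeated_String.py | repeatedString
-- ===== SOURCE A (Python) =====
-- def repeatedString(s, n):
--     s_count = 0
--     a_count = 0
--     for i in s:
--         if i == "a":
--             s_count +=1
--     a_count = (n // len(s))*s_count
--     remain = n % len(s)
--
--     for j in range(remain):
--         if s[j] == "a":
--             a_count += 1
--     return a_count
-- ===== SOURCE B (Python) =====
-- def repeatedString(s, n):
--     L = len(s)
--     return sum((n - 1 - i) // L + 1 for i, c in enumerate(s) if c == "a")
-- ===== Notes on version B (the rewrite author's own statement) =====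
-- stated objective: alternative
-- what changed: Replaces A's count-all-'a's-then-multiply-by-n//len(s)-plus-remainder-scan with a single per-position sum: each 'a' at index i contributes (n-1-i)//len(s)+1 occurrences among the first n characters.
import Mathlib
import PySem

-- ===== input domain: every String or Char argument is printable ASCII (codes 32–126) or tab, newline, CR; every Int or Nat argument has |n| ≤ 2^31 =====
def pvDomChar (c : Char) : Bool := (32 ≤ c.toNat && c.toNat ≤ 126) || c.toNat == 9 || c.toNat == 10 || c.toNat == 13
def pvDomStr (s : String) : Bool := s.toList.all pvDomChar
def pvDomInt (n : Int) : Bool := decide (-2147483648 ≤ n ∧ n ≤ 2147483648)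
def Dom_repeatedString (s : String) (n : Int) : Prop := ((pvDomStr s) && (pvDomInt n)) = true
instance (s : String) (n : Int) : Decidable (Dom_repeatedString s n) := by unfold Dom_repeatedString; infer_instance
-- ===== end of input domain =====

-- B replaces A's count-multiply-plus-remainder scheme by a single per-position sum of (n-1-i)//len(s)+1 over the 'a' positions (alternative decomposition, not claimed faster).

-- ===== PORT A =====
def repeatedString (s : String) (n : Int) : Int :=
  let s_count : Int := s.toList.foldl (fun acc i => if i = 'a' then acc + 1 else acc) 0
  let a_count : Int := (PySem.Int.floordiv n (PySem.Str.len s)) * s_count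
  let remain : Int := PySem.Int.mod n (PySem.Str.len s)
  (PySem.List.pyRange 0 remain 1).foldl
    (fun acc j => if PySem.Str.pyGet? s j = some 'a' then acc + 1 else acc) a_count

-- ===== PORT B =====
def repeatedString_alt (s : String) (n : Int) : Int :=
  let L : Int := PySem.Str.len s
  (PySem.List.enumerate s.toList).foldl
    (fun acc p => if p.2 = 'a' then acc + (PySem.Int.floordiv (n - 1 - p.1) L + 1) else acc) 0

-- ===== PRECONDITION & SPEC =====
-- Pre_ excludes only the empty string, on which A raises ZeroDivisionError (len(s) = 0).
def Pre_repeatedString (s : String) (n : Int) : Prop := s ≠ ""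
instance (s : String) (n : Int) : Decidable (Pre_repeatedString s n) := by unfold Pre_repeatedString; infer_instance
def pvWitness_repeatedString : String × Int := ("abca", 10)

def Spec_repeatedString (s : String) (n : Int) (out : Int) : Prop := out = repeatedString_alt s n
instance (s : String) (n : Int) (out : Int) : Decidable (Spec_repeatedString s n out) := by unfold Spec_repeatedString; infer_instance

-- ===== CLAIM (what is proved, stated in full; the proofs are below) =====
def Claim_equal_repeatedString : Prop := ∀ (s : String) (n : Int), Dom_repeatedString s n → Pre_repeatedString s n → Spec_repeatedString s n (repeatedString s n)

-- ===== LEMMAS AND PROOFS =====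

def countA (l : List Char) : Int := (l.countP (· = 'a') : Int)

-- per-'a'-position partial sum of B's generator, starting at index k
def sumG (g : Int → Int) : List Char → Int → Int
  | [], _ => 0
  | c :: tl, k => (if c = 'a' then g k else 0) + sumG g tl (k + 1)

theorem loopA1 (l : List Char) (a : Int) :
    l.foldl (fun acc i => if i = 'a' then acc + 1 else acc) a = a + countA l := by
  induction l generalizing a with
  | nil => simp [countA]
  | cons c tl ih =>
    simp only [List.foldl_cons, ih, countA, List.countP_cons]
    by_cases h : c = 'a' <;> simp [h] <;> push_cast <;> ring

theorem loopA2 (s : String) (m : Nat) (hm : m ≤ s.toList.length) (a : Int) :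
    (PySem.List.pyRange 0 (m : Int) 1).foldl
      (fun acc j => if PySem.Str.pyGet? s j = some 'a' then acc + 1 else acc) a
    = a + countA (s.toList.take m) := by
  induction m generalizing a with
  | zero => simp [countA]
  | succ m ih =>
    have hm' : m ≤ s.toList.length := by omega
    have hcast : ((m + 1 : Nat) : Int) = (m : Int) + 1 := by push_cast; ring
    rw [hcast, PySem.List.pyRange_one_succ_right (by positivity), List.foldl_append,
        ih hm']
    have hget : PySem.Str.pyGet? s (m : Int) = some (s.toList[m]'(by omega)) := by
      simp [List.getElem?_eq_getElem (by omega : m < s.toList.length)]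
    have htake : s.toList.take (m + 1) = s.toList.take m ++ [s.toList[m]'(by omega)] := by
      rw [List.take_succ, List.getElem?_eq_getElem (by omega : m < s.toList.length)]
      simp
    rw [htake]
    simp only [List.foldl_cons, List.foldl_nil, hget, countA, List.countP_append,
      List.countP_cons, List.countP_nil]
    by_cases h : s.toList[m]'(by omega) = 'a' <;> simp [h] <;> push_cast <;> ring

theorem loopB (g : Int → Int) (l : List Char) (k a : Int) :
    (PySem.List.enumerate l k).foldl
      (fun acc p => if p.2 = 'a' then acc + g p.1 else acc) a
    = a + sumG g l k := by
  induction l generalizing k a with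
  | nil => simp [PySem.List.enumerate_nil, sumG]
  | cons c tl ih =>
    rw [PySem.List.enumerate_cons]
    simp only [List.foldl_cons, ih, sumG]
    by_cases h : c = 'a' <;> simp [h] <;> ring

theorem g_eval (n L i : Int) (hL : 0 < L) (hi : 0 ≤ i) (hiL : i < L) :
    PySem.Int.floordiv (n - 1 - i) L + 1
    = PySem.Int.floordiv n L + (if i < PySem.Int.mod n L then 1 else 0) := by
  set q := PySem.Int.floordiv n L with hq
  set r := PySem.Int.mod n L with hr
  have hqr : q * L + r = n := PySem.Int.floordiv_mul_add_mod n L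
  have hr0 : 0 ≤ r := by
    rw [hr, PySem.Int.mod_eq_emod_of_pos hL]; exact Int.emod_nonneg n (by omega)
  have hrL : r < L := by
    rw [hr, PySem.Int.mod_eq_emod_of_pos hL]; exact Int.emod_lt_of_pos n hL
  by_cases hcase : i < r
  · have : PySem.Int.floordiv (n - 1 - i) L = q := by
      rw [PySem.Int.floordiv_eq_iff_of_pos hL]
      constructor <;> nlinarith
    rw [this]; simp [hcase]
  · have : PySem.Int.floordiv (n - 1 - i) L = q - 1 := by
      rw [PySem.Int.floordiv_eq_iff_of_pos hL]
      constructor <;> nlinarith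
    rw [this]; simp [hcase]

theorem sumG_eval (n L : Int) (hL : 0 < L) (l : List Char) (k : Int)
    (hk : 0 ≤ k) (hkL : k + l.length ≤ L) :
    sumG (fun i => PySem.Int.floordiv (n - 1 - i) L + 1) l k
    = PySem.Int.floordiv n L * countA l
      + countA (l.take (PySem.Int.mod n L - k).toNat) := by
  set q := PySem.Int.floordiv n L with hq
  set r := PySem.Int.mod n L with hr
  have hr0 : 0 ≤ r := by
    rw [hr, PySem.Int.mod_eq_emod_of_pos hL]; exact Int.emod_nonneg n (by omega)
  have hrL : r < L := by
    rw [hr, PySem.Int.mod_eq_emod_of_pos hL]; exact Int.emod_lt_of_pos n hL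
  induction l generalizing k with
  | nil => simp [sumG, countA]
  | cons c tl ih =>
    have hlen : (c :: tl).length = tl.length + 1 := by simp
    have hkL' : k < L := by rw [hlen] at hkL; omega
    have hg : PySem.Int.floordiv (n - 1 - k) L + 1 = q + (if k < r then 1 else 0) := by
      rw [hq, hr]; exact g_eval n L k hL hk hkL'
    have ihtl := ih (k + 1) (by omega) (by rw [hlen] at hkL; push_cast; omega)
    by_cases hcase : k < r
    · have htk : (r - k).toNat = (r - (k + 1)).toNat + 1 := by omega
      rw [show sumG (fun i => PySem.Int.floordiv (n - 1 - i) L + 1) (c :: tl) k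
            = (if c = 'a' then PySem.Int.floordiv (n - 1 - k) L + 1 else 0)
              + sumG (fun i => PySem.Int.floordiv (n - 1 - i) L + 1) tl (k + 1) from rfl,
          ihtl, hg, htk]
      simp only [List.take_succ_cons, countA, List.countP_cons]
      by_cases h : c = 'a' <;> simp [h, hcase] <;> push_cast <;> ring
    · have htk : (r - k).toNat = 0 := by omega
      have htk' : (r - (k + 1)).toNat = 0 := by omega
      rw [show sumG (fun i => PySem.Int.floordiv (n - 1 - i) L + 1) (c :: tl) k
            = (if c = 'a' then PySem.Int.floordiv (n - 1 - k) L + 1 else 0)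
              + sumG (fun i => PySem.Int.floordiv (n - 1 - i) L + 1) tl (k + 1) from rfl,
          ihtl, hg, htk, htk']
      simp only [List.take_zero, countA, List.countP_cons, List.countP_nil]
      by_cases h : c = 'a' <;> simp [h, hcase] <;> push_cast <;> ring

-- ===== VERDICT (by name: the statement is the Claim_ definition above) =====
theorem repeatedString_spec : Claim_equal_repeatedString := by
  intro s n _ hpre
  simp only [Spec_repeatedString, repeatedString, repeatedString_alt]
  have hl : s.toList ≠ [] := by
    intro h
    apply hpre
    have h2 : String.ofList s.toList = s := String.ofList_toList
    rw [← h2, h]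
  have hL0 : 0 < (s.toList.length : Int) := by
    have : 0 < s.toList.length := List.length_pos_of_ne_nil hl
    exact_mod_cast this
  have hlen : PySem.Str.len s = (s.toList.length : Int) := by
    simp [PySem.Str.len_eq]
  set L : Int := (s.toList.length : Int) with hLdef
  have hr0 : 0 ≤ PySem.Int.mod n L := by
    rw [PySem.Int.mod_eq_emod_of_pos hL0]; exact Int.emod_nonneg n (by omega)
  have hrL : PySem.Int.mod n L < L := by
    rw [PySem.Int.mod_eq_emod_of_pos hL0]; exact Int.emod_lt_of_pos n hL0
  rw [hlen]
  -- A side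
  rw [loopA1]
  have hrcast : PySem.Int.mod n L = (((PySem.Int.mod n L).toNat : Nat) : Int) := by omega
  rw [hrcast, loopA2 s (PySem.Int.mod n L).toNat (by omega)]
  -- B side
  rw [loopB (fun i => PySem.Int.floordiv (n - 1 - i) L + 1)]
  rw [sumG_eval n L hL0 s.toList 0 le_rfl (by omega)]
  simp
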